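-- pv_equiv track=rewrite | github.com/dieuson/Android | Rails/Fortnite/python/image_recognition/tuto3.py | convert_locs_to_lines
-- ===== SOURCE A (Python) =====
-- from operator import itemgetter
--
-- def set_line_index(line):
--     all_data = []
--     for e in line:
--         array_data = []
--         if (e[0] < 200):
--             array_data = ["name", e]
--         elif (e[0] < 600):
--             array_data = ["date", e]
--         elif (e[0] < 800):
--             array_data = ["duration", e]
--         elif (e[0] < 900):
--             array_data = ["rank", e]
--         else:
--             array_data = ["eliminations", e]
--         all_data.append(array_data)
--     return all_data
--
-- def convert_locs_to_lines(locs):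
--     ref_y = 0
--     line = []
--     lines = []
--     for (i, (x, y, w, h)) in enumerate(locs):
--         element = (x, y, w, h)
--         if (ref_y == 0):
--             ref_y = y
--         if ((y - ref_y) > 3):
--             line.sort(key=itemgetter(0))
--             line = set_line_index(line)
--             if (len(line) == 5):
--                 lines.append(line)
--             line = [element]
--             ref_y = y
--         else:
--             line.append(element)
--
--     line.sort(key=itemgetter(0))
--     line = set_line_index(line)
--     lines.append(line)
--     return lines
-- ===== SOURCE B (Python) =====
-- from operator import itemgetter
--
-- _THRESHOLDS = [(200, "name"), (600, "date"), (800, "duration"), (900, "rank")]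
--
--
-- def _label(e):
--     for bound, name in _THRESHOLDS:
--         if e[0] < bound:
--             return name
--     return "eliminations"
--
--
-- def _render(seg):
--     return [[_label(e), e] for e in sorted(seg, key=itemgetter(0))]
--
--
-- def convert_locs_to_lines(locs):
--     # Pass 1: arithmetic scan over y-values only, recording the index of each
--     # line start (no element lists are built here).
--     n = len(locs)
--     cuts = [0]
--     ref = 0
--     for i in range(n):
--         y = locs[i][1]
--         if ref == 0:
--             ref = y
--         if y - ref > 3:
--             cuts.append(i)
--             ref = y
--     # Pass 2: materialize each line by slicing between consecutive cuts;
--     # interior lines are kept only when their width is 5, the final one always.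
--     out = []
--     for t in range(len(cuts) - 1):
--         i, j = cuts[t], cuts[t + 1]
--         if j - i == 5:
--             out.append(_render(locs[i:j]))
--     out.append(_render(locs[cuts[-1]:n]))
--     return out
-- ===== Notes on version B (the rewrite author's own statement) =====
-- stated objective: alternative
-- what changed: Instead of accumulating element lists and sorting/labeling inside one stateful scan, B scans only the y-values to compute the integer indices where each line starts, then materializes every line by slicing locs between consecutive cut indices (interior slices kept when their width is 5, the final slice always) and sorts/labels each slice.
import Mathlib
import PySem

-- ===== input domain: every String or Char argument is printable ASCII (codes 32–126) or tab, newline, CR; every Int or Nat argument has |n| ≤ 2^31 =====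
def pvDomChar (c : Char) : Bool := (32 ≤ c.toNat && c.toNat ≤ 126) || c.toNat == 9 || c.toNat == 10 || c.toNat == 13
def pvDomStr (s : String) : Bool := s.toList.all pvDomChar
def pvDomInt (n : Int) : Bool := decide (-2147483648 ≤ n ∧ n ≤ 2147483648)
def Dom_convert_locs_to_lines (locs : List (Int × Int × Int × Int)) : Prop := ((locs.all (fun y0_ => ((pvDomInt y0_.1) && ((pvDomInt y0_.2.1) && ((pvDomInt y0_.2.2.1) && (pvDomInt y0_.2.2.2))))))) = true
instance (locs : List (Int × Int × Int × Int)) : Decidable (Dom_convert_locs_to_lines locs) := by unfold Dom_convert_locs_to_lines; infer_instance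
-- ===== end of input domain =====

-- B replaces A's single stateful element-accumulating loop by an arithmetic
-- scan that records line-start indices only, followed by slicing between
-- consecutive cut indices (objective: alternative decomposition).

-- ===== PORT A =====
-- set_line_index: for-loop appending the labeled pair for each element
def set_line_index (line : List (Int × Int × Int × Int)) :
    List (String × (Int × Int × Int × Int)) :=
  line.foldl (fun all_data e =>
    all_data ++ [if e.1 < 200 then ("name", e)
      else if e.1 < 600 then ("date", e)
      else if e.1 < 800 then ("duration", e)
      else if e.1 < 900 then ("rank", e)
      else ("eliminations", e)]) []

def convert_locs_to_lines (locs : List (Int × Int × Int × Int)) :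
    List (List (String × (Int × Int × Int × Int))) :=
  let st := (PySem.List.enumerate locs).foldl
    (fun (st : Int × List (Int × Int × Int × Int) ×
          List (List (String × (Int × Int × Int × Int)))) ie =>
      let (ref_y, line, lines) := st
      let element := ie.2
      let y := element.2.1
      let ref_y := if ref_y == 0 then y else ref_y
      if y - ref_y > 3 then
        let line := set_line_index (PySem.List.sorted line (fun e => e.1))
        let lines := if line.length == 5 then lines ++ [line] else lines
        (y, [element], lines)
      else
        (ref_y, line ++ [element], lines))
    (0, [], [])
  let (_, line, lines) := st
  lines ++ [set_line_index (PySem.List.sorted line (fun e => e.1))]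

-- ===== PORT B =====
-- _THRESHOLDS and the early-return scan of _label
def pvThresholds : List (Int × String) :=
  [(200, "name"), (600, "date"), (800, "duration"), (900, "rank")]

def pvLabelGo : List (Int × String) → Int → String
  | [], _ => "eliminations"
  | (bound, name) :: rest, x => if x < bound then name else pvLabelGo rest x

def pvLabel (e : Int × Int × Int × Int) : String := pvLabelGo pvThresholds e.1

def pvRender (seg : List (Int × Int × Int × Int)) :
    List (String × (Int × Int × Int × Int)) :=
  (PySem.List.sorted seg (fun e => e.1)).map (fun e => (pvLabel e, e))

def convert_locs_to_lines_alt (locs : List (Int × Int × Int × Int)) :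
    List (List (String × (Int × Int × Int × Int))) :=
  let n : Int := locs.length
  -- Pass 1: arithmetic scan recording the index of each line start
  let st := (PySem.List.pyRange 0 n 1).foldl
    (fun (st : List Int × Int) i =>
      let (cuts, ref) := st
      let y := (PySem.List.pyGetD locs i (0, 0, 0, 0)).2.1
      let ref := if ref == 0 then y else ref
      if y - ref > 3 then (cuts ++ [i], y) else (cuts, ref))
    ([0], 0)
  let (cuts, _) := st
  -- Pass 2: materialize each line by slicing between consecutive cuts
  let out := (PySem.List.pyRange 0 ((cuts.length : Int) - 1) 1).foldl
    (fun out t =>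
      let i := PySem.List.pyGetD cuts t 0
      let j := PySem.List.pyGetD cuts (t + 1) 0
      if j - i == 5 then
        out ++ [pvRender (PySem.List.slice locs (some i) (some j))]
      else out)
    []
  out ++ [pvRender (PySem.List.slice locs
    (some (PySem.List.pyGetD cuts (-1) 0)) (some n))]

-- ===== PRECONDITION & SPEC =====
def Spec_convert_locs_to_lines (locs : List (Int × Int × Int × Int)) (out : List (List (String × (Int × Int × Int × Int)))) : Prop := out = convert_locs_to_lines_alt locs
instance (locs : List (Int × Int × Int × Int)) (out : List (List (String × (Int × Int × Int × Int)))) : Decidable (Spec_convert_locs_to_lines locs out) := by unfold Spec_convert_locs_to_lines; infer_instance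

-- ===== CLAIM (what is proved, stated in full; the proofs are below) =====
def Claim_equal_convert_locs_to_lines : Prop := ∀ (locs : List (Int × Int × Int × Int)), Dom_convert_locs_to_lines locs → Spec_convert_locs_to_lines locs (convert_locs_to_lines locs)

-- ===== LEMMAS AND PROOFS =====

-- Abbreviations used only by the proofs (a mid-level grouping machine both
-- ports are reduced to).
def pvSeg (locs : List (Int × Int × Int × Int)) (a b : Nat) :
    List (Int × Int × Int × Int) := (locs.drop a).take (b - a)

def stepA (st : Int × List (Int × Int × Int × Int) ×
      List (List (String × (Int × Int × Int × Int))))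
    (e : Int × Int × Int × Int) :
    Int × List (Int × Int × Int × Int) ×
      List (List (String × (Int × Int × Int × Int))) :=
  let (ref_y, line, lines) := st
  let y := e.2.1
  let ref_y := if ref_y == 0 then y else ref_y
  if y - ref_y > 3 then
    let line2 := set_line_index (PySem.List.sorted line (fun e => e.1))
    (y, [e], if line2.length == 5 then lines ++ [line2] else lines)
  else
    (ref_y, line ++ [e], lines)

def stepG (st : List (List (Int × Int × Int × Int)) ×
      List (Int × Int × Int × Int) × Int)
    (e : Int × Int × Int × Int) :
    List (List (Int × Int × Int × Int)) ×
      List (Int × Int × Int × Int) × Int :=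
  let (groups, cur, ref_y) := st
  let y := e.2.1
  let ref_y := if ref_y == 0 then y else ref_y
  if y - ref_y > 3 then (groups ++ [cur], [e], y)
  else (groups, cur ++ [e], ref_y)

def stepC (st : List Int × Int) (p : Int × (Int × Int × Int × Int)) :
    List Int × Int :=
  let (cuts, ref) := st
  let y := p.2.2.1
  let ref := if ref == 0 then y else ref
  if y - ref > 3 then (cuts ++ [p.1], y) else (cuts, ref)

def procAll (gs : List (List (Int × Int × Int × Int))) :
    List (List (String × (Int × Int × Int × Int))) :=
  (gs.filter (fun g => g.length == 5)).map pvRender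

-- the A-side labeling loop is the map with pvLabel
theorem pvLabel_eq (e : Int × Int × Int × Int) :
    pvLabel e = (if e.1 < 200 then "name"
      else if e.1 < 600 then "date"
      else if e.1 < 800 then "duration"
      else if e.1 < 900 then "rank"
      else "eliminations") := by
  simp [pvLabel, pvThresholds, pvLabelGo]

theorem set_line_index_eq_map (line : List (Int × Int × Int × Int)) :
    set_line_index line = line.map (fun e => (pvLabel e, e)) := by
  suffices h : ∀ (acc : List (String × (Int × Int × Int × Int))),
      line.foldl (fun all_data e =>
        all_data ++ [if e.1 < 200 then ("name", e)
          else if e.1 < 600 then ("date", e)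
          else if e.1 < 800 then ("duration", e)
          else if e.1 < 900 then ("rank", e)
          else ("eliminations", e)]) acc
        = acc ++ line.map (fun e => (pvLabel e, e)) by
    simpa [set_line_index] using h []
  induction line with
  | nil => simp
  | cons e t ih =>
      intro acc
      simp only [List.foldl_cons, List.map_cons, ih, pvLabel_eq]
      split_ifs <;> simp

theorem finish_eq (line : List (Int × Int × Int × Int)) :
    set_line_index (PySem.List.sorted line (fun e => e.1)) = pvRender line := by
  simp [set_line_index_eq_map, pvRender]

theorem pvRender_length (line : List (Int × Int × Int × Int)) :
    (pvRender line).length = line.length := by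
  simp [pvRender, PySem.List.length_sorted]

theorem procAll_append (gs : List (List (Int × Int × Int × Int)))
    (c : List (Int × Int × Int × Int)) :
    procAll (gs ++ [c]) = procAll gs ++ (if c.length == 5 then [pvRender c] else []) := by
  simp only [procAll, List.filter_append]
  split_ifs with h <;> simp [List.filter, h]

-- A's enumerate fold ignores the index
theorem foldA_enumerate (locs : List (Int × Int × Int × Int)) :
    ∀ (s : Int) (st : Int × List (Int × Int × Int × Int) ×
      List (List (String × (Int × Int × Int × Int)))),
    (PySem.List.enumerate locs s).foldl (fun st ie => stepA st ie.2) st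
      = locs.foldl stepA st := by
  induction locs with
  | nil => intro s st; simp [PySem.List.enumerate_nil]
  | cons e t ih => intro s st; simp [PySem.List.enumerate_cons, ih]

-- A's fold carries procAll of the grouping machine's groups
theorem loop_invariant (locs : List (Int × Int × Int × Int)) :
    ∀ (r : Int) (c : List (Int × Int × Int × Int))
      (gs : List (List (Int × Int × Int × Int))),
    locs.foldl stepA (r, c, procAll gs)
      = (let (gs', c', r') := locs.foldl stepG (gs, c, r)
         (r', c', procAll gs')) := by
  induction locs with
  | nil => intro r c gs; simp
  | cons e t ih =>
      intro r c gs
      simp only [List.foldl_cons, stepA, stepG]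
      by_cases h : e.2.1 - (if r == 0 then e.2.1 else r) > 3
      · simp only [h, if_pos, finish_eq, pvRender_length]
        rw [show (if (c.length == 5) = true
              then procAll gs ++ [pvRender c] else procAll gs) = procAll (gs ++ [c]) by
            rw [procAll_append]; split_ifs <;> simp]
        exact ih _ _ _
      · simp only [h, if_false]
        exact ih _ _ _

-- ===== B-side lemmas =====

-- index/pyGetD fold over range(len(xs)) is the enumerate fold
theorem foldl_pyRange_enum {α β : Type} (zs : List α) (d : α)
    (g : β → Int × α → β) :
    ∀ (ws : List α) (s : Nat) (init : β), zs.drop s = ws →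
    (PySem.List.pyRange (s : Int) (zs.length : Int) 1).foldl
        (fun st i => g st (i, PySem.List.pyGetD zs i d)) init
      = (PySem.List.enumerate ws (s : Int)).foldl g init := by
  intro ws
  induction ws with
  | nil =>
      intro s init hd
      have hlen : zs.length ≤ s := by
        by_contra hc
        have := List.drop_eq_nil_iff.mp hd
        omega
      rw [PySem.List.pyRange_one_eq_nil (by exact_mod_cast hlen)]
      simp [PySem.List.enumerate_nil]
  | cons w ws ih =>
      intro s init hd
      have hs : s < zs.length := by
        by_contra hc
        rw [List.drop_eq_nil_iff.mpr (by omega)] at hd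
        simp at hd
      rw [PySem.List.pyRange_one_cons (by exact_mod_cast hs)]
      rw [PySem.List.enumerate_cons]
      simp only [List.foldl_cons]
      have hget : PySem.List.pyGetD zs (s : Int) d = w := by
        have h0 : zs[s]? = some w := by
          have : (zs.drop s)[0]? = zs[s + 0]? := List.getElem?_drop
          simp [hd] at this
          simpa using this.symm
        simp [PySem.List.pyGetD_natCast, List.getD, h0]
      rw [hget]
      have hd' : zs.drop (s + 1) = ws := by
        rw [List.drop_add_one_eq_tail_drop, hd]; rfl
      have := ih (s + 1) (g init ((s : Int), w)) hd'
      rw [show ((s : Int) + 1) = ((s + 1 : Nat) : Int) by push_cast; ring]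
      exact this


theorem zipTail_append (cs : List Nat) (h : cs ≠ []) (s : Nat) :
    (cs ++ [s]).zip (cs ++ [s]).tail
      = cs.zip cs.tail ++ [(cs.getLastD 0, s)] := by
  induction cs with
  | nil => simp at h
  | cons a t ih =>
      cases t with
      | nil => simp
      | cons b t' => simpa using ih (by simp)


theorem pairs_lt (cs : List Nat) (h : cs.Pairwise (· < ·)) :
    ∀ p ∈ cs.zip cs.tail, p.1 < p.2 := by
  induction cs with
  | nil => simp
  | cons a t ih =>
      cases t with
      | nil => simp
      | cons b t' =>
        intro p hp
        simp only [List.zip_cons_cons, List.tail_cons, List.mem_cons] at hp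
        rcases hp with rfl | hp
        · exact (List.pairwise_cons.mp h).1 b (by simp)
        · exact ih (List.pairwise_cons.mp h).2 p hp


theorem pvSeg_extend (locs : List (Int × Int × Int × Int))
    (e : Int × Int × Int × Int) (ws : List (Int × Int × Int × Int))
    (a s : Nat) (ha : a ≤ s) (hd : locs.drop s = e :: ws) :
    pvSeg locs a (s + 1) = pvSeg locs a s ++ [e] := by
  have h0 : (locs.drop a)[s - a]? = some e := by
    rw [List.getElem?_drop]
    have : (locs.drop s)[0]? = locs[s + 0]? := List.getElem?_drop
    simp [hd] at this
    rw [show a + (s - a) = s + 0 by omega]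
    exact this.symm
  rw [pvSeg, pvSeg, show s + 1 - a = (s - a) + 1 by omega, List.take_add_one, h0]
  rfl


theorem pvSeg_single (locs : List (Int × Int × Int × Int))
    (e : Int × Int × Int × Int) (ws : List (Int × Int × Int × Int))
    (s : Nat) (hd : locs.drop s = e :: ws) :
    pvSeg locs s (s + 1) = [e] := by
  rw [pvSeg, hd]; simp


-- the cut-recording machine simulates the grouping machine
theorem cut_invariant (locs : List (Int × Int × Int × Int)) :
    ∀ (ws : List (Int × Int × Int × Int)) (s : Nat) (cs : List Nat) (ref : Int),
    locs.drop s = ws →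
    cs ≠ [] →
    cs.Pairwise (· < ·) →
    (∀ c ∈ cs, c ≤ cs.getLastD 0) →
    (cs.getLastD 0 < s ∨ (s = 0 ∧ cs = [0] ∧ ref = 0)) →
    ∃ cs' : List Nat, cs' ≠ [] ∧
      ((PySem.List.enumerate ws (s : Int)).foldl stepC
          (cs.map (fun c : Nat => (c : Int)), ref)).1 = cs'.map (fun c : Nat => (c : Int)) ∧
      cs'.Pairwise (· < ·) ∧
      (∀ c ∈ cs', c ≤ cs'.getLastD 0) ∧ cs'.getLastD 0 ≤ s + ws.length ∧
      (ws.foldl stepG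
          ((cs.zip cs.tail).map (fun p => pvSeg locs p.1 p.2),
            pvSeg locs (cs.getLastD 0) s, ref))
        = ((cs'.zip cs'.tail).map (fun p => pvSeg locs p.1 p.2),
            pvSeg locs (cs'.getLastD 0) (s + ws.length),
            ((PySem.List.enumerate ws (s : Int)).foldl stepC
              (cs.map (fun c : Nat => (c : Int)), ref)).2) := by
  intro ws
  induction ws with
  | nil =>
      intro s cs ref hd hne hpw hall hlast
      refine ⟨cs, hne, by simp [PySem.List.enumerate_nil], hpw, hall, ?_, by
        simp [PySem.List.enumerate_nil]⟩
      rcases hlast with h | ⟨rfl, rfl, _⟩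
      · simpa using le_of_lt h
      · simp
  | cons e ws ih =>
      intro s cs ref hd hne hpw hall hlast
      rw [PySem.List.enumerate_cons]
      simp only [List.foldl_cons]
      have hstepC : stepC (cs.map (fun c : Nat => (c : Int)), ref) ((s : Int), e)
          = (if e.2.1 - (if ref == 0 then e.2.1 else ref) > 3
              then (cs.map (fun c : Nat => (c : Int)) ++ [(s : Int)], e.2.1)
              else (cs.map (fun c : Nat => (c : Int)), if ref == 0 then e.2.1 else ref)) := rfl
      have hstepG : ∀ (G : List (List (Int × Int × Int × Int)))
          (cur : List (Int × Int × Int × Int)),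
          stepG (G, cur, ref) e
          = (if e.2.1 - (if ref == 0 then e.2.1 else ref) > 3
              then (G ++ [cur], [e], e.2.1)
              else (G, cur ++ [e], if ref == 0 then e.2.1 else ref)) := fun _ _ => rfl
      have hd' : locs.drop (s + 1) = ws := by
        rw [List.drop_add_one_eq_tail_drop, hd]; rfl
      have hcast : ((s : Int) + 1) = ((s + 1 : Nat) : Int) := by push_cast; ring
      by_cases hbr : e.2.1 - (if ref == 0 then e.2.1 else ref) > 3
      · -- break: a new line starts at index s
        have hlt : cs.getLastD 0 < s := by
          rcases hlast with h | ⟨rfl, rfl, rfl⟩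
          · exact h
          · simp at hbr
        have hpw' : (cs ++ [s]).Pairwise (· < ·) := by
          rw [List.pairwise_append]
          exact ⟨hpw, by simp, fun a ha b hb => by
            simp at hb; subst hb; exact lt_of_le_of_lt (hall a ha) hlt⟩
        have hlastD : (cs ++ [s]).getLastD 0 = s := by
          simp [List.getLastD_eq_getLast?]
        have hall' : ∀ c ∈ cs ++ [s], c ≤ (cs ++ [s]).getLastD 0 := by
          intro c hc
          rw [hlastD]
          rcases List.mem_append.mp hc with h | h
          · exact le_of_lt (lt_of_le_of_lt (hall c h) hlt)
          · simp at h; omega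
        obtain ⟨cs', hne', hC, hpw'', hall'', hle'', hG⟩ :=
          ih (s + 1) (cs ++ [s]) e.2.1 hd' (by simp) hpw' hall' (by left; omega)
        refine ⟨cs', hne', ?_, hpw'', hall'', by simp only [List.length_cons]; omega, ?_⟩
        · rw [hstepC, if_pos hbr, hcast]
          simpa using hC
        · rw [hstepG, if_pos hbr, hstepC, if_pos hbr, hcast]
          have hz : ((cs ++ [s]).zip (cs ++ [s]).tail).map (fun p => pvSeg locs p.1 p.2)
              = (cs.zip cs.tail).map (fun p => pvSeg locs p.1 p.2)
                ++ [pvSeg locs (cs.getLastD 0) s] := by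
            rw [zipTail_append cs hne s]; simp
          rw [← hz, ← pvSeg_single locs e ws s hd, ← hlastD]
          have := hG
          simp only [hlastD] at this ⊢
          rw [this]
          simp only [List.length_cons]
          rw [show s + (ws.length + 1) = s + 1 + ws.length by omega]
          simp [List.map_append]
      · -- no break: e joins the current line
        have hle : cs.getLastD 0 ≤ s := by
          rcases hlast with h | ⟨rfl, rfl, _⟩
          · omega
          · simp
        obtain ⟨cs', hne', hC, hpw'', hall'', hle'', hG⟩ :=
          ih (s + 1) cs (if ref == 0 then e.2.1 else ref) hd' hne hpw hall (by left; omega)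
        refine ⟨cs', hne', ?_, hpw'', hall'', by simp only [List.length_cons]; omega, ?_⟩
        · rw [hstepC, if_neg hbr, hcast]
          exact hC
        · rw [hstepG, if_neg hbr, hstepC, if_neg hbr, hcast]
          rw [pvSeg_extend locs e ws (cs.getLastD 0) s hle hd] at hG
          rw [hG]
          simp only [List.length_cons]
          rw [show s + (ws.length + 1) = s + 1 + ws.length by omega]


-- pass 2's indexed pairs are zip cs cs.tail
theorem rangeMap_pairs (cs : List Nat) :
    (List.range (cs.length - 1)).map
        (fun t => (cs.getD t 0, cs.getD (t + 1) 0)) = cs.zip cs.tail := by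
  apply List.ext_getElem
  · simp [List.length_zip, List.length_tail]
  · intro i h1 h2
    simp only [List.getElem_map, List.getElem_range, List.getElem_zip, List.getElem_tail]
    have hlen : i + 1 < cs.length := by simp at h1; omega
    rw [List.getD_eq_getElem cs 0 (by omega), List.getD_eq_getElem cs 0 hlen]


-- B's pass 2 over the final cut list equals procAll of the grouped segments
theorem pass2_eq (locs : List (Int × Int × Int × Int)) (cs : List Nat)
    (hpw : cs.Pairwise (· < ·))
    (hall : ∀ c ∈ cs, c ≤ cs.getLastD 0) (hle : cs.getLastD 0 ≤ locs.length) :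
    (PySem.List.pyRange 0 (((cs.map (fun c : Nat => (c : Int))).length : Int) - 1) 1).foldl
        (fun out t =>
          let i := PySem.List.pyGetD (cs.map (fun c : Nat => (c : Int))) t 0
          let j := PySem.List.pyGetD (cs.map (fun c : Nat => (c : Int))) (t + 1) 0
          if j - i == 5 then
            out ++ [pvRender (PySem.List.slice locs (some i) (some j))]
          else out)
        []
      = procAll ((cs.zip cs.tail).map (fun p => pvSeg locs p.1 p.2)) := by
  have hmem_le : ∀ p ∈ cs.zip cs.tail, p.1 < p.2 ∧ p.2 ≤ locs.length := by
    intro p hp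
    refine ⟨pairs_lt cs hpw p hp, ?_⟩
    have h2 : p.2 ∈ cs := List.mem_of_mem_tail (List.of_mem_zip hp).2
    exact le_trans (hall p.2 h2) hle
  have hlen : (cs.map (fun c : Nat => (c : Int))).length = cs.length := by simp
  rw [hlen, PySem.List.pyRange_one]
  have htn : (((cs.length : Int)) - 1 - 0).toNat = cs.length - 1 := by omega
  rw [htn, List.foldl_map]
  -- turn indexed access into the zip pairs
  have hstep : ∀ (out : List (List (String × (Int × Int × Int × Int)))) (k : Nat),
      k ∈ List.range (cs.length - 1) →
      (fun out (t : Int) =>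
        let i := PySem.List.pyGetD (cs.map (fun c : Nat => (c : Int))) t 0
        let j := PySem.List.pyGetD (cs.map (fun c : Nat => (c : Int))) (t + 1) 0
        if j - i == 5 then
          out ++ [pvRender (PySem.List.slice locs (some i) (some j))]
        else out) out ((0 : Int) + (k : Nat))
        = (fun out (p : Nat × Nat) =>
            if (pvSeg locs p.1 p.2).length == 5 then
              out ++ [pvRender (pvSeg locs p.1 p.2)]
            else out) out (cs.getD k 0, cs.getD (k + 1) 0) := by
    intro out k hk
    have hk' : k < cs.length - 1 := List.mem_range.mp hk
    have hia : PySem.List.pyGetD (cs.map (fun c : Nat => (c : Int))) ((0 : Int) + (k : Nat)) 0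
        = ((cs.getD k 0 : Nat) : Int) := by
      rw [show (0 : Int) + (k : Nat) = ((k : Nat) : Int) by ring]
      rw [PySem.List.pyGetD_natCast]
      exact List.getD_map cs 0 _
    have hja : PySem.List.pyGetD (cs.map (fun c : Nat => (c : Int))) (((0 : Int) + (k : Nat)) + 1) 0
        = ((cs.getD (k + 1) 0 : Nat) : Int) := by
      rw [show ((0 : Int) + (k : Nat)) + 1 = (((k + 1 : Nat)) : Int) by push_cast; ring]
      rw [PySem.List.pyGetD_natCast]
      exact List.getD_map cs 0 _
    simp only [hia, hja]
    have hmem : (cs.getD k 0, cs.getD (k + 1) 0) ∈ cs.zip cs.tail := by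
      rw [← rangeMap_pairs]
      exact List.mem_map.mpr ⟨k, hk, rfl⟩
    obtain ⟨hlt, hub⟩ := hmem_le _ hmem
    have hseglen : (pvSeg locs (cs.getD k 0) (cs.getD (k + 1) 0)).length
        = cs.getD (k + 1) 0 - cs.getD k 0 := by
      simp only [pvSeg, List.length_take, List.length_drop]
      omega
    have hcond : (((cs.getD (k + 1) 0 : Nat) : Int) - ((cs.getD k 0 : Nat) : Int) == 5)
        = ((pvSeg locs (cs.getD k 0) (cs.getD (k + 1) 0)).length == 5) := by
      rw [Bool.eq_iff_iff]
      simp only [beq_iff_eq, hseglen]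
      omega
    rw [hcond, PySem.List.slice_natCast]
    rfl
  rw [PySem.List.foldl_congr_mem _ _ _ _ hstep]
  have hfoldpairs :
      (List.range (cs.length - 1)).foldl
        (fun out k => (fun out (p : Nat × Nat) =>
            if (pvSeg locs p.1 p.2).length == 5 then
              out ++ [pvRender (pvSeg locs p.1 p.2)]
            else out) out (cs.getD k 0, cs.getD (k + 1) 0)) []
      = (cs.zip cs.tail).foldl
          (fun out (p : Nat × Nat) =>
            if (pvSeg locs p.1 p.2).length == 5 then
              out ++ [pvRender (pvSeg locs p.1 p.2)]
            else out) [] := by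
    rw [← rangeMap_pairs, List.foldl_map]
  rw [hfoldpairs,
    PySem.List.foldl_append_if (fun p : Nat × Nat => (pvSeg locs p.1 p.2).length == 5)
      (fun p : Nat × Nat => pvRender (pvSeg locs p.1 p.2)) (cs.zip cs.tail) []]
  rw [procAll, List.filter_map, List.map_map]
  rfl

-- ===== VERDICT (by name: the statement is the Claim_ definition above) =====
theorem convert_locs_to_lines_spec : Claim_equal_convert_locs_to_lines := by
  intro locs _
  unfold Spec_convert_locs_to_lines
  -- A's fold is the grouping machine followed by procAll
  have hA : convert_locs_to_lines locs
      = ((PySem.List.enumerate locs).foldl (fun st ie => stepA st ie.2) (0, [], [])).2.2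
        ++ [set_line_index (PySem.List.sorted
              ((PySem.List.enumerate locs).foldl (fun st ie => stepA st ie.2) (0, [], [])).2.1
              (fun e => e.1))] := rfl
  rcases hst : locs.foldl stepG ([], [], 0) with ⟨gsf, cf, rf⟩
  have hinv : locs.foldl stepA (0, [], []) = (rf, cf, procAll gsf) := by
    have h := loop_invariant locs 0 [] []
    rw [hst] at h
    simpa [procAll] using h
  have hAval : convert_locs_to_lines locs = procAll gsf ++ [pvRender cf] := by
    rw [hA, foldA_enumerate, hinv, finish_eq]
  -- B's pass 1 is the cut machine
  have hB1 : (PySem.List.pyRange 0 ((locs.length : Nat) : Int) 1).foldl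
      (fun (st : List Int × Int) i =>
        let (cuts, ref) := st
        let y := (PySem.List.pyGetD locs i (0, 0, 0, 0)).2.1
        let ref := if ref == 0 then y else ref
        if y - ref > 3 then (cuts ++ [i], y) else (cuts, ref))
      ([0], 0)
      = (PySem.List.enumerate locs (((0 : Nat) : Int))).foldl stepC ([0], 0) := by
    exact foldl_pyRange_enum locs (0, 0, 0, 0) stepC locs 0 ([0], 0) (by simp)
  obtain ⟨cs', hne', hC, hpw', hall', hle', hG⟩ :=
    cut_invariant locs locs 0 [0] 0 (by simp) (by simp) (by simp) (by simp)
      (Or.inr ⟨rfl, rfl, rfl⟩)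
  have e1 : (([0] : List Nat).zip ([0] : List Nat).tail).map
      (fun p => pvSeg locs p.1 p.2) = [] := by simp
  have e2 : pvSeg locs (([0] : List Nat).getLastD 0) 0 = [] := by simp [pvSeg]
  rw [e1, e2, hst] at hG
  have hgs : gsf = (cs'.zip cs'.tail).map (fun p => pvSeg locs p.1 p.2) :=
    congrArg (fun t => t.1) hG
  have hcf : cf = pvSeg locs (cs'.getLastD 0) (0 + locs.length) :=
    congrArg (fun t => t.2.1) hG
  -- B's value, via its two passes
  have hBdef : convert_locs_to_lines_alt locs
      = (fun (cuts : List Int) =>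
          (PySem.List.pyRange 0 ((cuts.length : Int) - 1) 1).foldl
            (fun out t =>
              let i := PySem.List.pyGetD cuts t 0
              let j := PySem.List.pyGetD cuts (t + 1) 0
              if j - i == 5 then
                out ++ [pvRender (PySem.List.slice locs (some i) (some j))]
              else out) []
          ++ [pvRender (PySem.List.slice locs
                (some (PySem.List.pyGetD cuts (-1) 0)) (some (locs.length : Int)))])
        ((PySem.List.pyRange 0 ((locs.length : Nat) : Int) 1).foldl
          (fun (st : List Int × Int) i =>
            let (cuts, ref) := st
            let y := (PySem.List.pyGetD locs i (0, 0, 0, 0)).2.1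
            let ref := if ref == 0 then y else ref
            if y - ref > 3 then (cuts ++ [i], y) else (cuts, ref)) ([0], 0)).1 := rfl
  have hcuts : ((PySem.List.pyRange 0 ((locs.length : Nat) : Int) 1).foldl
      (fun (st : List Int × Int) i =>
        let (cuts, ref) := st
        let y := (PySem.List.pyGetD locs i (0, 0, 0, 0)).2.1
        let ref := if ref == 0 then y else ref
        if y - ref > 3 then (cuts ++ [i], y) else (cuts, ref)) ([0], 0)).1
      = cs'.map (fun c : Nat => (c : Int)) := by
    rw [hB1]; exact hC
  rw [hAval, hBdef, hcuts]
  simp only []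
  -- pass 2
  rw [pass2_eq locs cs' hpw' hall' (by simpa using hle'), ← hgs]
  -- the trailing line
  have hmapne : cs'.map (fun c : Nat => (c : Int)) ≠ [] := by
    simp [hne']
  have hlast : PySem.List.pyGetD (cs'.map (fun c : Nat => (c : Int))) (-1) 0
      = ((cs'.getLastD 0 : Nat) : Int) := by
    rw [PySem.List.pyGetD_neg_one _ 0 hmapne, List.getLast_map]
    congr 1
    rw [List.getLastD_eq_getLast?, List.getLast?_eq_some_getLast (by simpa using hne')]
    rfl
  rw [hlast, PySem.List.slice_natCast, hcf]
  simp [pvSeg]
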